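-- pv_equiv track=rewrite | github.com/jamesben6688/coding | dfs/keyboard_string.py | can_type_word_dfs
-- ===== SOURCE A (Python) =====
-- def can_type_word_dfs(keyboard, k, word):
--     from collections import defaultdict
--
--     m, n = len(keyboard), len(keyboard[0])
--     pos = defaultdict(list)
--     for i in range(m):
--         for j in range(n):
--             pos[keyboard[i][j]].append((i, j))
--
--     visited = set()
--
--     def dfs(index, x, y):
--         if index == len(word):
--             return True
--
--         key = (index, x, y)
--         if key in visited:
--             return False
--         visited.add(key)
--
--         for nx, ny in pos[word[index]]:
--             if abs(nx - x) + abs(ny - y) <= k: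
--                 if dfs(index + 1, nx, ny):
--                     return True
--         return False
--
--     # 从首字母的所有位置出发
--     for x, y in pos[word[0]]:
--         if dfs(1, x, y):
--             return True
--     return False
-- ===== SOURCE B (Python) =====
-- def can_type_word_dfs(keyboard, k, word):
--     # Layered reachability: iterate over the word once, keeping the set of
--     # positions of the current letter that are reachable from some start.
--     n = len(keyboard[0])
--     pos = {}
--     for i, row in enumerate(keyboard):
--         for j, c in enumerate(row[:n]):
--             pos.setdefault(c, []).append((i, j))
--     cur = pos.get(word[0], [])
--     for c in word[1:]:
--         prev = cur
--         cur = [p for p in pos.get(c, [])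
--                if any(abs(p[0] - q[0]) + abs(p[1] - q[1]) <= k for q in prev)]
--     return len(cur) > 0
-- ===== Notes on version B (the rewrite author's own statement) =====
-- stated objective: simpler
-- what changed: Replaces the recursive memoized DFS (with a shared visited-set threaded across start positions) by an iterative layered-reachability pass: one forward sweep over the word keeping the list of positions of the current letter reachable from some start.
import Mathlib
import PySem

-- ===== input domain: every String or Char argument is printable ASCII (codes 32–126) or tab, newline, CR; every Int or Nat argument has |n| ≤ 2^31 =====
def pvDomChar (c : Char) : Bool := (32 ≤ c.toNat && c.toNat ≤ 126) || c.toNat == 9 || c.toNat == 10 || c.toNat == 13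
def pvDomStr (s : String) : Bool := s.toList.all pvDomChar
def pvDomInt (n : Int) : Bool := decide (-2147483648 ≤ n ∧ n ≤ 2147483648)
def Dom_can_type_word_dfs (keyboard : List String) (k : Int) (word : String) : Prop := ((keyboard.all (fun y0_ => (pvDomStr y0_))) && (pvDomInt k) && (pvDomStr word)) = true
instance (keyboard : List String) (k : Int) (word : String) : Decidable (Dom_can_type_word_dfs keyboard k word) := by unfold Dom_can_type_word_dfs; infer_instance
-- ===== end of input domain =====

-- B replaces A's recursive memoized DFS by an iterative layered-reachability sweep over the word (objective: simpler).

-- ===== PORT A =====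
-- pos = defaultdict(list); for i in range(m): for j in range(n): pos[keyboard[i][j]].append((i, j))
-- (keyboard[i][j] ported with pyGetD defaults; under Pre_ every access is in range, so the defaults are never used)
def pvPosA (keyboard : List String) : PySem.Dict Char (List (Int × Int)) :=
  (PySem.List.pyRange 0 (keyboard.length : Int) 1).foldl (fun d i =>
    (PySem.List.pyRange 0 ((keyboard.headD "").toList.length : Int) 1).foldl (fun d j =>
      d.modify (PySem.List.pyGetD (PySem.List.pyGetD keyboard i "").toList j ' ') [] (· ++ [(i, j)])) d)
    PySem.Dict.empty

-- the nested function dfs, with the mutable `visited` set threaded through (fuel = len(word) - index makes the recursion structural; the fuel-0 fallthrough in pvTryA is unreachable at the call discipline and only makes the definition total)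
mutual
def pvDfsA (pos : PySem.Dict Char (List (Int × Int))) (k : Int) (w : List Char) :
    Nat → Nat → Int → Int → List (Nat × Int × Int) → Bool × List (Nat × Int × Int)
  | fuel, index, x, y, visited =>
    if index = w.length then (true, visited)
    else if (index, x, y) ∈ visited then (false, visited)
    else pvTryA pos k w fuel (pos.getD (w.getD index ' ') []) index x y ((index, x, y) :: visited)
  termination_by fuel _ _ _ _ => (fuel, 1, 0)

def pvTryA (pos : PySem.Dict Char (List (Int × Int))) (k : Int) (w : List Char) :
    Nat → List (Int × Int) → Nat → Int → Int → List (Nat × Int × Int) → Bool × List (Nat × Int × Int)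
  | _, [], _, _, _, visited => (false, visited)
  | 0, _ :: _, _, _, _, visited => (false, visited)
  | fuel + 1, (nx, ny) :: rest, index, x, y, visited =>
    if |nx - x| + |ny - y| ≤ k then
      match pvDfsA pos k w fuel (index + 1) nx ny visited with
      | (true, v') => (true, v')
      | (false, v') => pvTryA pos k w (fuel + 1) rest index x y v'
    else pvTryA pos k w (fuel + 1) rest index x y visited
  termination_by fuel cands _ _ _ _ => (fuel, 0, cands.length)
end

-- for x, y in pos[word[0]]: if dfs(1, x, y): return True / return False
def pvOuterA (pos : PySem.Dict Char (List (Int × Int))) (k : Int) (w : List Char) :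
    List (Int × Int) → List (Nat × Int × Int) → Bool
  | [], _ => false
  | (x, y) :: rest, visited =>
    match pvDfsA pos k w (w.length - 1) 1 x y visited with
    | (true, _) => true
    | (false, v') => pvOuterA pos k w rest v'

def can_type_word_dfs (keyboard : List String) (k : Int) (word : String) : Bool :=
  let w := word.toList
  let pos := pvPosA keyboard
  pvOuterA pos k w (pos.getD (w.getD 0 ' ') []) []

-- ===== PORT B =====
-- pos built with enumerate and setdefault(c, []).append((i, j)); row[:n] is row.toList.take n (exact: n is a nonnegative length)
def pvPosB (keyboard : List String) : PySem.Dict Char (List (Int × Int)) :=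
  (PySem.List.enumerate keyboard 0).foldl (fun d ir =>
    (PySem.List.enumerate (ir.2.toList.take (keyboard.headD "").toList.length) 0).foldl (fun d jc =>
      d.modify jc.2 [] (· ++ [(ir.1, jc.1)])) d)
    PySem.Dict.empty

-- cur = [p for p in pos.get(c, []) if any(|p0-q0|+|p1-q1| <= k for q in prev)]
def pvStepB (pos : PySem.Dict Char (List (Int × Int))) (k : Int)
    (cur : List (Int × Int)) (c : Char) : List (Int × Int) :=
  (pos.getD c []).filter (fun p => cur.any (fun q => decide (|p.1 - q.1| + |p.2 - q.2| ≤ k)))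

-- word[1:] is w.drop 1 (exact: slice from nonnegative 1)
def can_type_word_dfs_alt (keyboard : List String) (k : Int) (word : String) : Bool :=
  let w := word.toList
  let pos := pvPosB keyboard
  let cur := (w.drop 1).foldl (pvStepB pos k) (pos.getD (w.getD 0 ' ') [])
  decide (0 < cur.length)

-- ===== PRECONDITION & SPEC =====
-- Pre_ excludes exactly the inputs where A raises IndexError: empty keyboard (keyboard[0]),
-- empty word (word[0]), and a row shorter than row 0 (keyboard[i][j] with j < len(keyboard[0])).
def Pre_can_type_word_dfs (keyboard : List String) (_k : Int) (word : String) : Prop :=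
  keyboard ≠ [] ∧ word.toList ≠ [] ∧
    ∀ s ∈ keyboard, (keyboard.headD "").toList.length ≤ s.toList.length
instance (keyboard : List String) (k : Int) (word : String) : Decidable (Pre_can_type_word_dfs keyboard k word) := by unfold Pre_can_type_word_dfs; infer_instance

def pvWitness_can_type_word_dfs : List String × Int × String := (["ab", "cd"], 1, "abd")

def Spec_can_type_word_dfs (keyboard : List String) (k : Int) (word : String) (out : Bool) : Prop := out = can_type_word_dfs_alt keyboard k word
instance (keyboard : List String) (k : Int) (word : String) (out : Bool) : Decidable (Spec_can_type_word_dfs keyboard k word out) := by unfold Spec_can_type_word_dfs; infer_instance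

-- ===== CLAIM (what is proved, stated in full; the proofs are below) =====
def Claim_equal_can_type_word_dfs : Prop := ∀ (keyboard : List String) (k : Int) (word : String), Dom_can_type_word_dfs keyboard k word → Pre_can_type_word_dfs keyboard k word → Spec_can_type_word_dfs keyboard k word (can_type_word_dfs keyboard k word)

-- ===== LEMMAS AND PROOFS =====

-- Reachability along a suffix of the word: pvReach pos k suffix x y = "from (x,y) one can type all of suffix"
def pvReach (pos : PySem.Dict Char (List (Int × Int))) (k : Int) : List Char → Int → Int → Bool
  | [], _, _ => true
  | c :: rest, x, y =>
    (pos.getD c []).any (fun p => decide (|p.1 - x| + |p.2 - y| ≤ k) && pvReach pos k rest p.1 p.2)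

-- a visited entry is "dead": its state cannot complete the word
def pvBad (pos : PySem.Dict Char (List (Int × Int))) (k : Int) (w : List Char)
    (s : Nat × Int × Int) : Prop :=
  pvReach pos k (w.drop s.1) s.2.1 s.2.2 = false

-- the statement of the dfs invariant, at a given fuel (fuel = len(word) - index at every call)
def pvDfsOk (pos : PySem.Dict Char (List (Int × Int))) (k : Int) (w : List Char) (fuel : Nat) : Prop :=
  ∀ index x y v, index + fuel = w.length →
    (∀ s ∈ v, index ≤ s.1 → pvBad pos k w s) →
    (pvDfsA pos k w fuel index x y v).1 = pvReach pos k (w.drop index) x y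
    ∧ (∀ s ∈ (pvDfsA pos k w fuel index x y v).2, s ∈ v ∨ index ≤ s.1)
    ∧ ((pvDfsA pos k w fuel index x y v).1 = false →
        ∀ s ∈ (pvDfsA pos k w fuel index x y v).2, index ≤ s.1 → pvBad pos k w s)

theorem pvTryA_correct (pos : PySem.Dict Char (List (Int × Int))) (k : Int) (w : List Char)
    (fuel : Nat) (hdfs : pvDfsOk pos k w fuel) :
    ∀ cands index x y v, index + 1 + fuel = w.length →
      (∀ s ∈ v, index + 1 ≤ s.1 → pvBad pos k w s) →
      (pvTryA pos k w (fuel + 1) cands index x y v).1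
        = cands.any (fun p => decide (|p.1 - x| + |p.2 - y| ≤ k)
            && pvReach pos k (w.drop (index + 1)) p.1 p.2)
      ∧ (∀ s ∈ (pvTryA pos k w (fuel + 1) cands index x y v).2, s ∈ v ∨ index + 1 ≤ s.1)
      ∧ ((pvTryA pos k w (fuel + 1) cands index x y v).1 = false →
          ∀ s ∈ (pvTryA pos k w (fuel + 1) cands index x y v).2,
            index + 1 ≤ s.1 → pvBad pos k w s) := by
  intro cands
  induction cands with
  | nil =>
    intro index x y v hlen hv
    refine ⟨by simp [pvTryA], fun s hs => Or.inl (by simpa [pvTryA] using hs), ?_⟩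
    intro _ s hs
    exact hv s (by simpa [pvTryA] using hs)
  | cons p rest ih =>
    obtain ⟨nx, ny⟩ := p
    intro index x y v hlen hv
    by_cases hd : |nx - x| + |ny - y| ≤ k
    · have h := hdfs (index + 1) nx ny v (by omega) hv
      rcases hres : pvDfsA pos k w fuel (index + 1) nx ny v with ⟨b, v'⟩
      rw [hres] at h
      cases b with
      | true =>
        have hval : pvTryA pos k w (fuel + 1) ((nx, ny) :: rest) index x y v = (true, v') := by
          simp only [pvTryA, if_pos hd, hres]
        rw [hval]
        refine ⟨?_, fun s hs => h.2.1 s hs, by simp⟩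
        simp [hd, ← h.1]
      | false =>
        have hval : pvTryA pos k w (fuel + 1) ((nx, ny) :: rest) index x y v
            = pvTryA pos k w (fuel + 1) rest index x y v' := by
          simp only [pvTryA, if_pos hd, hres]
        have hv' : ∀ s ∈ v', index + 1 ≤ s.1 → pvBad pos k w s := h.2.2 rfl
        have hi := ih index x y v' hlen hv'
        rw [hval]
        refine ⟨?_, ?_, hi.2.2⟩
        · rw [hi.1]
          simp [hd, ← h.1]
        · intro s hs
          rcases hi.2.1 s hs with hin | hge
          · rcases h.2.1 s hin with hin2 | hge2
            · exact Or.inl hin2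
            · exact Or.inr hge2
          · exact Or.inr hge
    · have hval : pvTryA pos k w (fuel + 1) ((nx, ny) :: rest) index x y v
          = pvTryA pos k w (fuel + 1) rest index x y v := by
        simp only [pvTryA, if_neg hd]
      have hi := ih index x y v hlen hv
      rw [hval]
      refine ⟨?_, hi.2.1, hi.2.2⟩
      rw [hi.1]
      simp [hd]

theorem pvDfsA_correct (pos : PySem.Dict Char (List (Int × Int))) (k : Int) (w : List Char) :
    ∀ fuel, pvDfsOk pos k w fuel := by
  intro fuel
  induction fuel with
  | zero =>
    intro index x y v hlen hv
    have hL : index = w.length := by omega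
    have hval : pvDfsA pos k w 0 index x y v = (true, v) := by
      simp only [pvDfsA, if_pos hL]
    rw [hval]
    refine ⟨?_, fun s hs => Or.inl hs, by simp⟩
    rw [List.drop_of_length_le (by omega)]
    simp [pvReach]
  | succ fuel ih =>
    intro index x y v hlen hv
    have hL : index ≠ w.length := by omega
    have hlt : index < w.length := by omega
    by_cases hmem : (index, x, y) ∈ v
    · have hval : pvDfsA pos k w (fuel + 1) index x y v = (false, v) := by
        simp only [pvDfsA, if_neg hL, if_pos hmem]
      rw [hval]
      exact ⟨(hv _ hmem (le_refl _)).symm, fun s hs => Or.inl hs, fun _ => hv⟩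
    · have hval : pvDfsA pos k w (fuel + 1) index x y v
          = pvTryA pos k w (fuel + 1) (pos.getD (w.getD index ' ') []) index x y
              ((index, x, y) :: v) := by
        simp only [pvDfsA, if_neg hL, if_neg hmem]
      have hv' : ∀ s ∈ (index, x, y) :: v, index + 1 ≤ s.1 → pvBad pos k w s := by
        intro s hs hge
        rcases List.mem_cons.mp hs with rfl | hin
        · omega
        · exact hv s hin (by omega)
      have htry := pvTryA_correct pos k w fuel ih (pos.getD (w.getD index ' ') [])
        index x y ((index, x, y) :: v) (by omega) hv'
      have hreach : pvReach pos k (w.drop index) x y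
          = (pos.getD (w.getD index ' ') []).any
              (fun p => decide (|p.1 - x| + |p.2 - y| ≤ k)
                && pvReach pos k (w.drop (index + 1)) p.1 p.2) := by
        rw [List.drop_eq_getElem_cons hlt, List.getD_eq_getElem w ' ' hlt]
        simp [pvReach]
      rw [hval, hreach]
      refine ⟨htry.1, ?_, ?_⟩
      · intro s hs
        rcases htry.2.1 s hs with hin | hge
        · rcases List.mem_cons.mp hin with rfl | hin2
          · exact Or.inr (le_refl _)
          · exact Or.inl hin2
        · exact Or.inr (by omega)
      · intro hfalse s hs hge
        rcases htry.2.1 s hs with hin | hge2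
        · rcases List.mem_cons.mp hin with rfl | hin2
          · show pvReach pos k (w.drop index) x y = false
            rw [hreach, ← htry.1]
            exact hfalse
          · exact hv s hin2 hge
        · exact htry.2.2 hfalse s hs hge2

theorem pvOuterA_correct (pos : PySem.Dict Char (List (Int × Int))) (k : Int) (w : List Char)
    (hw : w ≠ []) :
    ∀ starts v, (∀ s ∈ v, 1 ≤ s.1 → pvBad pos k w s) →
      pvOuterA pos k w starts v
        = starts.any (fun p => pvReach pos k (w.drop 1) p.1 p.2) := by
  have hw1 : 1 ≤ w.length := List.length_pos_iff.mpr hw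
  intro starts
  induction starts with
  | nil => intro v _; simp [pvOuterA]
  | cons p rest ih =>
    obtain ⟨x, y⟩ := p
    intro v hv
    have h := pvDfsA_correct pos k w (w.length - 1) 1 x y v (by omega) hv
    rcases hres : pvDfsA pos k w (w.length - 1) 1 x y v with ⟨b, v'⟩
    rw [hres] at h
    cases b with
    | true =>
      have hval : pvOuterA pos k w ((x, y) :: rest) v = true := by
        simp only [pvOuterA, hres]
      have h1 : pvReach pos k (List.drop 1 w) x y = true := h.1.symm
      rw [hval]
      rw [List.drop_one] at h1
      simp [List.any_cons, h1]
    | false =>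
      have hval : pvOuterA pos k w ((x, y) :: rest) v = pvOuterA pos k w rest v' := by
        simp only [pvOuterA, hres]
      have h1 : pvReach pos k (List.drop 1 w) x y = false := h.1.symm
      rw [hval, ih v' (h.2.2 rfl)]
      rw [List.drop_one] at h1
      simp [List.any_cons, h1]

theorem pvStepB_fold (pos : PySem.Dict Char (List (Int × Int))) (k : Int) :
    ∀ (suffix : List Char) (cur : List (Int × Int)),
      decide (0 < (suffix.foldl (pvStepB pos k) cur).length)
        = cur.any (fun p => pvReach pos k suffix p.1 p.2) := by
  intro suffix
  induction suffix with
  | nil =>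
    intro cur
    cases cur <;> simp [pvReach]
  | cons c rest ih =>
    intro cur
    rw [List.foldl_cons, ih, Bool.eq_iff_iff]
    simp only [pvReach, pvStepB, List.any_eq_true, List.mem_filter,
      Bool.and_eq_true, decide_eq_true_eq]
    constructor
    · rintro ⟨p, ⟨hp, q, hq, hd⟩, hr⟩
      exact ⟨q, hq, p, hp, hd, hr⟩
    · rintro ⟨q, hq, p, hp, hd, hr⟩
      exact ⟨p, ⟨hp, q, hq, hd⟩, hr⟩

theorem pvEnumAppend {α : Type} (xs : List α) (a : α) :
    ∀ (s : Int), PySem.List.enumerate (xs ++ [a]) s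
      = PySem.List.enumerate xs s ++ [((s + xs.length : Int), a)] := by
  induction xs with
  | nil => intro s; simp [PySem.List.enumerate_cons, PySem.List.enumerate_nil]
  | cons x xs ih =>
    intro s
    simp only [List.cons_append, PySem.List.enumerate_cons, ih (s + 1), List.length_cons]
    have h : s + 1 + (xs.length : Int) = s + (↑xs.length + 1) := by ring
    rw [h]; norm_cast

theorem pvFoldIdx {α δ : Type} (dflt : α) (f : δ → Int → α → δ) :
    ∀ (xs : List α) (d : δ),
      (PySem.List.pyRange 0 (xs.length : Int) 1).foldl
          (fun d i => f d i (PySem.List.pyGetD xs i dflt)) d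
        = (PySem.List.enumerate xs 0).foldl (fun d p => f d p.1 p.2) d := by
  intro xs
  induction xs using List.reverseRecOn with
  | nil => intro d; simp [PySem.List.enumerate_nil]
  | append_singleton xs a ih =>
    intro d
    have hcast : ((xs ++ [a]).length : Int) = (xs.length : Int) + 1 := by
      simp
    rw [hcast, PySem.List.pyRange_one_succ_right (by positivity), List.foldl_append,
      pvEnumAppend xs a 0, List.foldl_append]
    have hcongr : (PySem.List.pyRange 0 (xs.length : Int) 1).foldl
        (fun d i => f d i (PySem.List.pyGetD (xs ++ [a]) i dflt)) d
        = (PySem.List.pyRange 0 (xs.length : Int) 1).foldl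
        (fun d i => f d i (PySem.List.pyGetD xs i dflt)) d := by
      apply PySem.List.foldl_congr_mem
      intro acc i hi
      obtain ⟨h0, hlt⟩ := (PySem.List.mem_pyRange_one).mp hi
      have hltn : i.toNat < xs.length := by omega
      rw [PySem.List.pyGetD_eq_getElem _ _ h0 (by simp; omega),
        PySem.List.pyGetD_eq_getElem _ _ h0 hlt]
      congr 1
      exact List.getElem_append_left hltn
    rw [hcongr, ih]
    simp only [List.foldl_cons, List.foldl_nil, PySem.List.pyGetD_natCast,
      List.getD_eq_getElem?_getD, List.getElem?_concat_length, Option.getD_some, zero_add]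

theorem pvInnerEq {n0 : Nat} (i : Int) (l : List Char)
    (d : PySem.Dict Char (List (Int × Int))) (h : n0 ≤ l.length) :
    (PySem.List.enumerate (l.take n0) 0).foldl
        (fun d jc => d.modify jc.2 [] (· ++ [(i, jc.1)])) d
      = (PySem.List.pyRange 0 (n0 : Int) 1).foldl
        (fun d j => d.modify (PySem.List.pyGetD l j ' ') [] (· ++ [(i, j)])) d := by
  have hF := pvFoldIdx ' ' (fun d j c => d.modify c [] (· ++ [(i, j)])) (l.take n0) d
  have hlen : ((l.take n0).length : Int) = (n0 : Int) := by
    simp only [List.length_take]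
    omega
  rw [hlen] at hF
  refine hF.symm.trans ?_
  apply PySem.List.foldl_congr_mem
  intro acc j hj
  obtain ⟨h0, hlt⟩ := (PySem.List.mem_pyRange_one).mp hj
  have hjn : j.toNat < n0 := by omega
  rw [PySem.List.pyGetD_eq_getElem _ _ h0 (by simp only [List.length_take]; push_cast; omega),
    PySem.List.pyGetD_eq_getElem _ _ h0 (by omega)]
  simp [List.getElem_take]

theorem pvPos_eq (keyboard : List String)
    (hlen : ∀ s ∈ keyboard, (keyboard.headD "").toList.length ≤ s.toList.length) :
    pvPosB keyboard = pvPosA keyboard := by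
  have hF := pvFoldIdx ""
      (fun d i row =>
        (PySem.List.pyRange 0 ((keyboard.headD "").toList.length : Int) 1).foldl
          (fun d j => d.modify (PySem.List.pyGetD row.toList j ' ') [] (· ++ [(i, j)])) d)
      keyboard PySem.Dict.empty
  have hc : pvPosB keyboard
      = (PySem.List.enumerate keyboard 0).foldl
          (fun d p =>
            (PySem.List.pyRange 0 ((keyboard.headD "").toList.length : Int) 1).foldl
              (fun d j => d.modify (PySem.List.pyGetD p.2.toList j ' ') [] (· ++ [(p.1, j)])) d)
          PySem.Dict.empty := by
    unfold pvPosB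
    apply PySem.List.foldl_congr_mem
    intro acc x hx
    have hmem : x.2 ∈ keyboard := by
      have hm := PySem.List.map_snd_enumerate keyboard 0
      rw [← hm]
      exact List.mem_map.mpr ⟨x, hx, rfl⟩
    exact pvInnerEq x.1 x.2.toList acc (hlen _ hmem)
  exact hc.trans hF.symm

-- ===== VERDICT (by name: the statement is the Claim_ definition above) =====
theorem can_type_word_dfs_spec : Claim_equal_can_type_word_dfs := by
  intro keyboard k word _ hpre
  obtain ⟨hkb, hw, hlen⟩ := hpre
  unfold Spec_can_type_word_dfs can_type_word_dfs can_type_word_dfs_alt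
  rw [pvPos_eq keyboard hlen]
  rw [pvStepB_fold, pvOuterA_correct (pos := pvPosA keyboard) (k := k) (w := word.toList) hw]
  intro s hs; simp at hs
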